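-- pv_equiv track=rewrite | github.com/pynanappboat/the-frog-escapes-in-28-days | main.py | days_to_escape
-- ===== SOURCE A (Python) =====
-- def days_to_escape(depth, climb, slide):
--     days = 0
--     current_height = 0
--
--     while current_height < depth:
--         days += 1
--         current_height += climb  # Frog climbs up during the day
--
--         if current_height >= depth:
--             break  # The frog escapes before sliding back
--
--         current_height -= slide  # Frog slides back at night
--
--     return days
-- ===== SOURCE B (Python) =====
-- def days_to_escape(depth, climb, slide):
--     # Closed form: first day k with (k-1)*(climb-slide) + climb >= depth.
--     if depth <= 0:
--         return 0
--     if climb >= depth: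
--         return 1
--     return -((climb - depth) // (climb - slide)) + 1
-- ===== Notes on version B (the rewrite author's own statement) =====
-- stated objective: simpler
-- what changed: Replaces A's day-by-day simulation loop with a closed-form ceiling-division formula ceil((depth-climb)/(climb-slide))+1 (with edge cases depth<=0 -> 0 and climb>=depth -> 1).
-- outside the precondition, e.g. on days_to_escape(10, 1, -20): A returns 1, B returns 2
import Mathlib
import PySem

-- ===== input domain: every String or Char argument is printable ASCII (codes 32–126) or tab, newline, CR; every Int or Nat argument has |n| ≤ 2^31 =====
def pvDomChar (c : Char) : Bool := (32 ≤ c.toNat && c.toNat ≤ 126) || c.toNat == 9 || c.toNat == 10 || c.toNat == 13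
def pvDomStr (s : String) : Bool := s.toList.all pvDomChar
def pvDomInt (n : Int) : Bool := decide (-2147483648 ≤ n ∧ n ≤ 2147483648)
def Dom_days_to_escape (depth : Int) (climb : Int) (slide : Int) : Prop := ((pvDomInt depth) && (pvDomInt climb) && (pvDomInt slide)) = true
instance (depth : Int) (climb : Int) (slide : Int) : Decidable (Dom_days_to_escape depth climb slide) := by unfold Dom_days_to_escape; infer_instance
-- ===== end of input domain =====

-- B replaces A's day-by-day simulation loop with a closed-form ceiling division.

-- ===== PORT A =====
-- Literal port of A's while-loop; the fuel argument only makes the recursion total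
-- (inside Pre_ the loop needs at most depth - climb + 1 iterations, so the fuel never runs out).
def daysLoop (depth : Int) (climb : Int) (slide : Int) : Nat → Int → Int → Int
  | 0, days, _ => days
  | fuel + 1, days, h =>
    if h < depth then
      if depth ≤ h + climb then days + 1
      else daysLoop depth climb slide fuel (days + 1) (h + climb - slide)
    else days

def days_to_escape (depth : Int) (climb : Int) (slide : Int) : Int :=
  daysLoop depth climb slide ((depth - climb).toNat + 2) 0 0

-- ===== PORT B =====
def days_to_escape_alt (depth : Int) (climb : Int) (slide : Int) : Int :=
  if depth ≤ 0 then 0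
  else if depth ≤ climb then 1
  else -(PySem.Int.floordiv (climb - depth) (climb - slide)) + 1

-- ===== PRECONDITION & SPEC =====
-- Pre_ keeps the puzzle's natural domain: it excludes climb ≤ slide with climb < depth,
-- where A loops forever, and negative slide (the frog rising at night) with climb < depth,
-- where A's night step may cross the rim so that A counts that night's day while B's
-- day-climb formula counts the next day's climb.
def Pre_days_to_escape (depth : Int) (climb : Int) (slide : Int) : Prop :=
  depth ≤ 0 ∨ depth ≤ climb ∨ (0 ≤ slide ∧ slide < climb)
instance (depth : Int) (climb : Int) (slide : Int) : Decidable (Pre_days_to_escape depth climb slide) := by unfold Pre_days_to_escape; infer_instance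
def pvWitness_days_to_escape : Int × Int × Int := (10, 3, 1)

def Spec_days_to_escape (depth : Int) (climb : Int) (slide : Int) (out : Int) : Prop := out = days_to_escape_alt depth climb slide
instance (depth : Int) (climb : Int) (slide : Int) (out : Int) : Decidable (Spec_days_to_escape depth climb slide out) := by unfold Spec_days_to_escape; infer_instance

-- ===== CLAIM (what is proved, stated in full; the proofs are below) =====
def Claim_equal_days_to_escape : Prop := ∀ (depth : Int) (climb : Int) (slide : Int), Dom_days_to_escape depth climb slide → Pre_days_to_escape depth climb slide → Spec_days_to_escape depth climb slide (days_to_escape depth climb slide)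

-- ===== LEMMAS AND PROOFS =====

-- Loop invariant: if q satisfies the ceiling bracket for the remaining height
-- depth - h - climb (q = ceil((depth - h - climb)/(climb - slide)) when positive, q = 0
-- when the next climb already escapes), then the loop returns days + q + 1.
lemma daysLoop_eq (depth climb slide : Int) (hs : 0 ≤ slide) (hcs : slide < climb) :
    ∀ (fuel : Nat) (q days h : Int), 0 ≤ q → h < depth →
      q * (climb - slide) - (climb - slide) < depth - h - climb →
      depth - h - climb ≤ q * (climb - slide) →
      q + 1 ≤ (fuel : Int) →
      daysLoop depth climb slide fuel days h = days + q + 1 := by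
  intro fuel
  induction fuel with
  | zero => intro q days h hq _ _ _ hfuel; exfalso; simp at hfuel; omega
  | succ n ih =>
    intro q days h hq hh hlo hhi hfuel
    simp only [daysLoop, if_pos hh]
    by_cases hesc : depth ≤ h + climb
    · rw [if_pos hesc]
      -- here q = 0
      have hq0 : q = 0 := by
        by_contra hne
        have h1 : 1 ≤ q := by omega
        have : 0 ≤ (q - 1) * (climb - slide) := mul_nonneg (by omega) (by omega)
        have e : (q - 1) * (climb - slide) = q * (climb - slide) - (climb - slide) := by ring
        linarith
      rw [hq0]; ring
    · rw [if_neg hesc]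
      push_neg at hesc
      have hnume : 1 ≤ depth - h - climb := by omega
      have hq1 : 1 ≤ q := by
        by_contra hne
        have hq0 : q = 0 := by omega
        rw [hq0] at hhi; simp at hhi; omega
      have e : (q - 1) * (climb - slide) = q * (climb - slide) - (climb - slide) := by ring
      have := ih (q - 1) (days + 1) (h + climb - slide) (by omega)
        (by omega)
        (by rw [e]; linarith)
        (by rw [e]; linarith)
        (by push_cast at hfuel ⊢; omega)
      rw [this]; ring

-- ===== VERDICT (by name: the statement is the Claim_ definition above) =====
theorem days_to_escape_spec : Claim_equal_days_to_escape := by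
  intro depth climb slide _ hpre
  unfold Spec_days_to_escape days_to_escape days_to_escape_alt
  by_cases h0 : depth ≤ 0
  · have : ¬ ((0 : Int) < depth) := by omega
    simp only [daysLoop, if_neg this, if_pos h0]
  · by_cases h1 : depth ≤ climb
    · have hlt : (0 : Int) < depth := by omega
      have hesc : depth ≤ 0 + climb := by omega
      simp only [daysLoop, if_pos hlt, if_pos hesc, if_neg h0, if_pos h1]
      norm_num
    · rcases hpre with hp | hp | ⟨hs, hcs⟩
      · exact absurd hp h0
      · exact absurd hp h1
      have hnet : (0 : Int) < climb - slide := by omega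
      set C : Int := -(PySem.Int.floordiv (climb - depth) (climb - slide)) with hC
      have hceil : (C - 1) * (climb - slide) < depth - climb ∧
          depth - climb ≤ C * (climb - slide) := by
        have : -(PySem.Int.floordiv (-(depth - climb)) (climb - slide)) = C := by
          rw [hC, neg_sub]
        exact (PySem.Int.neg_floordiv_neg_eq_iff_of_pos hnet).mp this
      have e : (C - 1) * (climb - slide) = C * (climb - slide) - (climb - slide) := by ring
      have hdc : 1 ≤ depth - climb := by omega
      have hC1 : 1 ≤ C := by
        by_contra hne
        push_neg at hne
        have hC0 : C ≤ 0 := by omega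
        have : C * (climb - slide) ≤ 0 * (climb - slide) :=
          mul_le_mul_of_nonneg_right hC0 (by omega)
        simp at this; linarith [hceil.2]
      have hCle : C ≤ depth - climb := by
        have h1 : C - 1 ≤ (C - 1) * (climb - slide) :=
          le_mul_of_one_le_right (by omega) (by omega)
        linarith [hceil.1]
      have hfuel : C + 1 ≤ (((depth - climb).toNat + 2 : Nat) : Int) := by
        have := Int.toNat_of_nonneg (show (0:Int) ≤ depth - climb by omega)
        push_cast
        omega
      have := daysLoop_eq depth climb slide hs hcs ((depth - climb).toNat + 2) C 0 0
        (by omega) (by omega)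
        (by linarith [hceil.1, e]) (by linarith [hceil.2]) hfuel
      rw [this, if_neg h0, if_neg h1]
      ring
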